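-- pv_equiv track=rewrite | github.com/yasseennandally/pqc_scanner | backend/scanner.py | derive_pqc_relevance
-- ===== SOURCE A (Python) =====
-- def derive_pqc_relevance(findings):
--     relevance = "low"
--     rec_lines = []
--
--     has_rsa = any(f.get("rule_id") == "PQC_RSA_ENDPOINT" for f in findings)
--     has_ec = any(f.get("rule_id") == "PQC_EC_ENDPOINT" for f in findings)
--
--     if has_rsa:
--         relevance = "high"
--     elif has_ec:
--         relevance = "medium"
--
--     for f in findings:
--         rid = f.get("rule_id", "")
--         if rid in ("PQC_RSA_ENDPOINT", "PQC_EC_ENDPOINT", "NO_TLS13", "LEGACY_TLS_SUPPORTED", "WEAK_CIPHER_ACCEPTED"):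
--             rec_lines.append("%s: %s" % (f.get("title"), f.get("remediation")))
--
--     if not rec_lines:
--         rec_lines = ["Maintain TLS hardening (TLS 1.3, remove weak suites) and plan crypto-agility for future PQC/hybrid TLS."]
--
--     return {"pqc_relevance": relevance, "pqc_recommendation": " ".join(rec_lines[:3])}
-- ===== SOURCE B (Python) =====
-- def derive_pqc_relevance(findings):
--     # One pass over findings: flags and (capped) recommendation lines together.
--     has_rsa = False
--     has_ec = False
--     rec_lines = []
--     rules = {"PQC_RSA_ENDPOINT", "PQC_EC_ENDPOINT", "NO_TLS13",
--              "LEGACY_TLS_SUPPORTED", "WEAK_CIPHER_ACCEPTED"}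
--     for f in findings:
--         rid = f.get("rule_id", "")
--         if rid == "PQC_RSA_ENDPOINT":
--             has_rsa = True
--         elif rid == "PQC_EC_ENDPOINT":
--             has_ec = True
--         if rid in rules and len(rec_lines) < 3:
--             rec_lines.append("%s: %s" % (f.get("title"), f.get("remediation")))
--     relevance = "high" if has_rsa else ("medium" if has_ec else "low")
--     if not rec_lines:
--         rec_lines = ["Maintain TLS hardening (TLS 1.3, remove weak suites) and plan crypto-agility for future PQC/hybrid TLS."]
--     return {"pqc_relevance": relevance, "pqc_recommendation": " ".join(rec_lines)}
-- ===== Notes on version B (the rewrite author's own statement) =====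
-- stated objective: alternative
-- what changed: Replaces A's three passes (two any() scans plus a loop collecting all matching lines, truncated afterwards) by a single loop that maintains the two flags and at most three recommendation lines.
import Mathlib
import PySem

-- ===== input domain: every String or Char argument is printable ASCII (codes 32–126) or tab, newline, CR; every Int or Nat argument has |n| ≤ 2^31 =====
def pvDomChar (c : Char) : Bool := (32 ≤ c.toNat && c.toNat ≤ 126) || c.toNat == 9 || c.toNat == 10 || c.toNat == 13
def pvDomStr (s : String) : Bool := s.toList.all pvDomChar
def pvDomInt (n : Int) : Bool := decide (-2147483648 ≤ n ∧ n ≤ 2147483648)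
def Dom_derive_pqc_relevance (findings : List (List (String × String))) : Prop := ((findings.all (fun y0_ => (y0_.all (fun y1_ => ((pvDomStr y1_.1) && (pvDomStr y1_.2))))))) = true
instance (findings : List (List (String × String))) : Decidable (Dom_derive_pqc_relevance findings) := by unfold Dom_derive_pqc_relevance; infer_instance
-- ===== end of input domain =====

-- B fuses A's three passes (two any() scans + a collect-all loop truncated afterwards)
-- into one loop keeping the flags and at most three recommendation lines (alternative decomposition).


-- ===== PORT A =====
-- f.get(k): first build the dict (later duplicate keys overwrite), then look up
def pvGet (f : List (String × String)) (k : String) : Option String :=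
  (PySem.Dict.ofList f).get? k

-- "%s" % x formats None as "None"
def pvFmt (o : Option String) : String := o.getD "None"

-- "%s: %s" % (f.get("title"), f.get("remediation"))
def pvRecLine (f : List (String × String)) : String :=
  pvFmt (pvGet f "title") ++ ": " ++ pvFmt (pvGet f "remediation")

def pvRules : List String :=
  ["PQC_RSA_ENDPOINT", "PQC_EC_ENDPOINT", "NO_TLS13", "LEGACY_TLS_SUPPORTED", "WEAK_CIPHER_ACCEPTED"]

def pvDefaultRec : String :=
  "Maintain TLS hardening (TLS 1.3, remove weak suites) and plan crypto-agility for future PQC/hybrid TLS."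

def derive_pqc_relevance (findings : List (List (String × String))) : List (String × String) :=
  let has_rsa := findings.any (fun f => pvGet f "rule_id" == some "PQC_RSA_ENDPOINT")
  let has_ec := findings.any (fun f => pvGet f "rule_id" == some "PQC_EC_ENDPOINT")
  let relevance := if has_rsa then "high" else if has_ec then "medium" else "low"
  let rec_lines := findings.foldl (fun acc f =>
      let rid := (pvGet f "rule_id").getD ""
      if pvRules.contains rid then acc ++ [pvRecLine f] else acc) []
  let rec_lines := if rec_lines = [] then [pvDefaultRec] else rec_lines
  [("pqc_relevance", relevance), ("pqc_recommendation", PySem.Str.join " " (rec_lines.take 3))]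

-- ===== PORT B =====
-- single-pass loop body: state = (has_rsa, has_ec, rec_lines) with rec_lines capped at 3
def pvStep (st : Bool × Bool × List String) (f : List (String × String)) :
    Bool × Bool × List String :=
  let rid := (pvGet f "rule_id").getD ""
  let st1 := if rid == "PQC_RSA_ENDPOINT" then (true, st.2.1, st.2.2)
             else if rid == "PQC_EC_ENDPOINT" then (st.1, true, st.2.2)
             else st
  if pvRules.contains rid ∧ st1.2.2.length < 3
  then (st1.1, st1.2.1, st1.2.2 ++ [pvRecLine f])
  else st1

def derive_pqc_relevance_alt (findings : List (List (String × String))) : List (String × String) :=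
  let st := findings.foldl pvStep (false, false, [])
  let relevance := if st.1 then "high" else if st.2.1 then "medium" else "low"
  let rec_lines := if st.2.2 = [] then [pvDefaultRec] else st.2.2
  [("pqc_relevance", relevance), ("pqc_recommendation", PySem.Str.join " " rec_lines)]

-- ===== PRECONDITION & SPEC =====
def Spec_derive_pqc_relevance (findings : List (List (String × String))) (out : List (String × String)) : Prop := out = derive_pqc_relevance_alt findings
instance (findings : List (List (String × String))) (out : List (String × String)) : Decidable (Spec_derive_pqc_relevance findings out) := by unfold Spec_derive_pqc_relevance; infer_instance

-- ===== CLAIM (what is proved, stated in full; the proofs are below) =====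
def Claim_equal_derive_pqc_relevance : Prop := ∀ (findings : List (List (String × String))), Dom_derive_pqc_relevance findings → Spec_derive_pqc_relevance findings (derive_pqc_relevance findings)

-- ===== LEMMAS AND PROOFS =====

-- the lines A's loop would collect, as a filter+map
def pvLines (fs : List (List (String × String))) : List String :=
  (fs.filter (fun f => pvRules.contains ((pvGet f "rule_id").getD ""))).map pvRecLine

lemma foldA_eq (fs : List (List (String × String))) (acc : List String) :
    fs.foldl (fun acc f =>
      let rid := (pvGet f "rule_id").getD ""
      if pvRules.contains rid then acc ++ [pvRecLine f] else acc) acc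
    = acc ++ pvLines fs := by
  induction fs generalizing acc with
  | nil => simp [pvLines]
  | cons f fs ih =>
    rw [List.foldl_cons, ih]
    by_cases h : ((pvGet f "rule_id").getD "") ∈ pvRules
    · simp [h, pvLines, List.filter_cons]
    · simp [h, pvLines, List.filter_cons]

-- Option-equality vs default-lookup bridge
lemma optEq_getD (o : Option String) (s : String) (hs : s ≠ "") :
    (o == some s) = (o.getD "" == s) := by
  cases o with
  | none => simp [Ne.symm hs]
  | some t => simp

lemma foldB_eq (fs : List (List (String × String))) (hr he : Bool) (r : List String)
    (hlen : r.length ≤ 3) :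
    fs.foldl pvStep (hr, he, r)
      = (hr || fs.any (fun f => (pvGet f "rule_id").getD "" == "PQC_RSA_ENDPOINT"),
         he || fs.any (fun f => (pvGet f "rule_id").getD "" == "PQC_EC_ENDPOINT"),
         (r ++ pvLines fs).take 3) := by
  induction fs generalizing hr he r with
  | nil => simp [pvLines, List.take_of_length_le (by simpa using hlen)]
  | cons f fs ih =>
    simp only [List.foldl_cons, List.any_cons, pvLines, List.filter_cons]
    set rid := (pvGet f "rule_id").getD "" with hrid
    by_cases hin : rid ∈ pvRules
    · by_cases hcap : r.length < 3
      · have hstep : pvStep (hr, he, r) f =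
            ((hr || (rid == "PQC_RSA_ENDPOINT")),
             (he || (!(rid == "PQC_RSA_ENDPOINT") && (rid == "PQC_EC_ENDPOINT"))),
             r ++ [pvRecLine f]) := by
          simp only [pvStep, ← hrid]
          by_cases h1 : rid == "PQC_RSA_ENDPOINT"
          · have h2 : (rid == "PQC_EC_ENDPOINT") = false := by
              simp only [beq_iff_eq] at h1 ⊢; simp [h1]
            simp [h1, h2, hin, hcap]
          · by_cases h2 : rid == "PQC_EC_ENDPOINT"
            · simp_all [hin, hcap]
            · simp_all [hin, hcap]
        rw [hstep, ih _ _ _ (by simp; omega)]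
        by_cases h1 : (rid == "PQC_RSA_ENDPOINT") = true
        · have h2 : (rid == "PQC_EC_ENDPOINT") = false := by
            simp only [beq_iff_eq] at h1 ⊢; simp [h1]
          simp [h1, h2, hin, pvLines, List.append_assoc, Bool.or_assoc]
        · simp [h1, hin, pvLines, List.append_assoc, Bool.or_assoc]
      · -- rec_lines already full: no append, take 3 swallows the new line
        have hlen3 : r.length = 3 := by omega
        have hstep : pvStep (hr, he, r) f =
            ((hr || (rid == "PQC_RSA_ENDPOINT")),
             (he || (!(rid == "PQC_RSA_ENDPOINT") && (rid == "PQC_EC_ENDPOINT"))),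
             r) := by
          simp only [pvStep, ← hrid]
          by_cases h1 : rid == "PQC_RSA_ENDPOINT"
          · have h2 : (rid == "PQC_EC_ENDPOINT") = false := by
              simp only [beq_iff_eq] at h1 ⊢; simp [h1]
            simp [h1, h2, hin, hcap]
          · by_cases h2 : rid == "PQC_EC_ENDPOINT"
            · simp_all [hin, hcap]
            · simp_all [hin, hcap]
        rw [hstep, ih _ _ _ hlen]
        have htake : ∀ (L : List String), (r ++ L).take 3 = r := by
          intro L; rw [List.take_append_of_le_length (by omega)]
          simp [List.take_of_length_le, hlen3]
        by_cases h1 : (rid == "PQC_RSA_ENDPOINT") = true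
        · have h2 : (rid == "PQC_EC_ENDPOINT") = false := by
            simp only [beq_iff_eq] at h1 ⊢; simp [h1]
          simp [h1, h2, hin, pvLines, htake, Bool.or_assoc]
        · simp [h1, hin, pvLines, htake, Bool.or_assoc]
    · -- rid not a relevant rule: flags also cannot be set
      have h1 : (rid == "PQC_RSA_ENDPOINT") = false := by
        by_contra hc; simp only [Bool.not_eq_false, beq_iff_eq] at hc
        simp [hc, pvRules] at hin
      have h2 : (rid == "PQC_EC_ENDPOINT") = false := by
        by_contra hc; simp only [Bool.not_eq_false, beq_iff_eq] at hc
        simp [hc, pvRules] at hin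
      have hstep : pvStep (hr, he, r) f = (hr, he, r) := by
        simp [pvStep, ← hrid, h1, h2, hin]
      rw [hstep, ih _ _ _ hlen]
      simp [h1, h2, hin, pvLines]

-- ===== VERDICT (by name: the statement is the Claim_ definition above) =====
theorem derive_pqc_relevance_spec : Claim_equal_derive_pqc_relevance := by
  intro findings _
  unfold Spec_derive_pqc_relevance derive_pqc_relevance derive_pqc_relevance_alt
  rw [foldB_eq findings false false [] (by simp), foldA_eq]
  simp only [Bool.false_or, List.nil_append]
  have hR : (fun f => pvGet f "rule_id" == some "PQC_RSA_ENDPOINT")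
      = (fun f => (pvGet f "rule_id").getD "" == "PQC_RSA_ENDPOINT") := by
    funext f; exact optEq_getD _ _ (by decide)
  have hE : (fun f => pvGet f "rule_id" == some "PQC_EC_ENDPOINT")
      = (fun f => (pvGet f "rule_id").getD "" == "PQC_EC_ENDPOINT") := by
    funext f; exact optEq_getD _ _ (by decide)
  rw [hR, hE]
  congr 2
  cases h : pvLines findings with
  | nil => simp
  | cons a l => simp
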